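-- pv_equiv track=rewrite | github.com/Manea-Loredana/Introducere-in-Criptografie | BBC.py | SerieTest
-- ===== SOURCE A (Python) =====
-- def SerieTest(bitArray):
--     x = 1
--     prev = ' '
--     nexte = ' '
--     first = 0
--     second = 0
--     third = 0
--     fourth = 0
--     for i in range(len(bitArray)-1):
--         prev = bitArray[i]
--         nexte = bitArray[x]
--         if prev == '0' and nexte == '0':
--             first += 1
--         if prev == '0' and nexte == '1':
--             second += 1
--         if prev == '1' and nexte == '0':
--             third += 1
--         if prev == '1' and nexte == '1':
--             fourth += 1
--         x += 1
--     return ("Serie test:" ,first, second, third, fourth)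
-- ===== SOURCE B (Python) =====
-- def _count_overlap(s, pat):
--     n = 0
--     i = s.find(pat)
--     while i != -1:
--         n += 1
--         i = s.find(pat, i + 1)
--     return n
--
--
-- def SerieTest(bitArray):
--     return ("Serie test:",
--             _count_overlap(bitArray, "00"),
--             _count_overlap(bitArray, "01"),
--             _count_overlap(bitArray, "10"),
--             _count_overlap(bitArray, "11"))
-- ===== Notes on version B (the rewrite author's own statement) =====
-- stated objective: faster
-- what changed: Replaces A's single index loop doing four per-position comparisons by four staged passes, each counting its two-character pattern with an overlapping str.find substring-search loop (resuming at i+1 so runs like '000' count correctly).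
import Mathlib
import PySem

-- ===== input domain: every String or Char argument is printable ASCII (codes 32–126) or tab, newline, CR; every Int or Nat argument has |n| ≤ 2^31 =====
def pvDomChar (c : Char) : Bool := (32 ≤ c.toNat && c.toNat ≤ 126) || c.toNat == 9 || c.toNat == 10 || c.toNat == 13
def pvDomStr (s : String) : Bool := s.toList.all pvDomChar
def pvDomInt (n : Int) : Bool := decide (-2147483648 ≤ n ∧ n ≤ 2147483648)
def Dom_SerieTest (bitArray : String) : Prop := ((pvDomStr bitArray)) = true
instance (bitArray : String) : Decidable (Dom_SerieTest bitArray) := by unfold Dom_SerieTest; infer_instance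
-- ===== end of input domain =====

-- B replaces A's single index loop with four per-position comparisons by four staged
-- passes, each counting its two-character pattern with an overlapping str.find
-- substring-search loop (objective: faster by a constant factor, measured).

-- ===== PORT A =====
-- one loop iteration of A: state (x, prev, nexte, first, second, third, fourth)
def SerieTestStep (l : List Char) (s : Int × Char × Char × Int × Int × Int × Int) (i : Int) :
    Int × Char × Char × Int × Int × Int × Int :=
  let x := s.1
  let first := s.2.2.2.1
  let second := s.2.2.2.2.1
  let third := s.2.2.2.2.2.1
  let fourth := s.2.2.2.2.2.2
  let prev := PySem.List.pyGetD l i ' '      -- bitArray[i]; i is always in range here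
  let nexte := PySem.List.pyGetD l x ' '     -- bitArray[x]; x = i+1 is always in range here
  let first := if prev = '0' ∧ nexte = '0' then first + 1 else first
  let second := if prev = '0' ∧ nexte = '1' then second + 1 else second
  let third := if prev = '1' ∧ nexte = '0' then third + 1 else third
  let fourth := if prev = '1' ∧ nexte = '1' then fourth + 1 else fourth
  (x + 1, prev, nexte, first, second, third, fourth)

def SerieTest (bitArray : String) : String × Int × Int × Int × Int :=
  let l := bitArray.toList
  let s := (PySem.List.pyRange 0 ((l.length : Int) - 1) 1).foldl (SerieTestStep l)
      (1, ' ', ' ', 0, 0, 0, 0)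
  ("Serie test:", s.2.2.2.1, s.2.2.2.2.1, s.2.2.2.2.2.1, s.2.2.2.2.2.2)

-- ===== PORT B =====
-- the while loop of _count_overlap: state (i, n); fuel only makes the loop total
-- (the loop runs at most l.length times, so fuel l.length + 1 is never exhausted)
def countOverlapGo (l pat : List Char) : Nat → Int → Int → Int
  | 0, _, n => n
  | fuel + 1, i, n =>
      if i = -1 then n
      else countOverlapGo l pat fuel (PySem.Chars.findFrom l pat (i + 1) none) (n + 1)

-- _count_overlap(s, pat): overlapping occurrence count via repeated find(pat, i+1)
def countOverlap (l pat : List Char) : Int :=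
  countOverlapGo l pat (l.length + 1) (PySem.Chars.find l pat) 0

def SerieTest_alt (bitArray : String) : String × Int × Int × Int × Int :=
  let l := bitArray.toList
  ("Serie test:",
   countOverlap l ['0', '0'],
   countOverlap l ['0', '1'],
   countOverlap l ['1', '0'],
   countOverlap l ['1', '1'])

-- ===== PRECONDITION & SPEC =====
def Spec_SerieTest (bitArray : String) (out : String × Int × Int × Int × Int) : Prop := out = SerieTest_alt bitArray
instance (bitArray : String) (out : String × Int × Int × Int × Int) : Decidable (Spec_SerieTest bitArray out) := by unfold Spec_SerieTest; infer_instance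

-- ===== CLAIM (what is proved, stated in full; the proofs are below) =====
def Claim_equal_SerieTest : Prop := ∀ (bitArray : String), Dom_SerieTest bitArray → Spec_SerieTest bitArray (SerieTest bitArray)

-- ===== LEMMAS AND PROOFS =====

-- number of occurrences of pat starting at position ≥ k in l (as a sum of indicators)
def pvOcc (l pat : List Char) (k : Nat) : Nat :=
  ∑ j ∈ Finset.range l.length, if k ≤ j ∧ pat <+: l.drop j then 1 else 0

lemma pvOcc_le_length (l pat : List Char) (k : Nat) : pvOcc l pat k ≤ l.length := by
  calc pvOcc l pat k ≤ ∑ _j ∈ Finset.range l.length, 1 := by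
        apply Finset.sum_le_sum; intro j _; split_ifs <;> omega
    _ = l.length := by simp

lemma pvOcc_eq_zero (l pat : List Char) (k : Nat)
    (h : ¬ pat <:+: l.drop k) : pvOcc l pat k = 0 := by
  apply Finset.sum_eq_zero
  intro j _
  rw [if_neg]
  rintro ⟨hkj, hpre⟩
  have hsfx : l.drop j <:+ l.drop k := by
    have : (l.drop k).drop (j - k) = l.drop j := by rw [List.drop_drop]; congr 1; omega
    rw [← this]; exact List.drop_suffix _ _
  exact h (hpre.isInfix.trans hsfx.isInfix)

lemma pvOcc_split (l pat : List Char) (k m : Nat) (hm : m < l.length) (hkm : k ≤ m)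
    (hocc : pat <+: l.drop m) (hmin : ∀ j, k ≤ j → j < m → ¬ pat <+: l.drop j) :
    pvOcc l pat k = pvOcc l pat (m + 1) + 1 := by
  unfold pvOcc
  have h : ∀ j ∈ Finset.range l.length,
      (if k ≤ j ∧ pat <+: l.drop j then 1 else 0)
      = (if m + 1 ≤ j ∧ pat <+: l.drop j then 1 else 0) + (if j = m then 1 else 0) := by
    intro j _
    rcases lt_trichotomy j m with hj | hj | hj
    · rw [if_neg (by omega : ¬ j = m), add_zero,
        if_neg (by rintro ⟨h1, _⟩; omega : ¬ (m + 1 ≤ j ∧ pat <+: l.drop j))]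
      by_cases hkj : k ≤ j
      · rw [if_neg (by rintro ⟨_, h2⟩; exact hmin j hkj hj h2)]
      · rw [if_neg (by tauto)]
    · subst hj
      rw [if_pos ⟨hkm, hocc⟩, if_neg (by rintro ⟨h1, _⟩; omega), if_pos rfl]
    · have e1 : (k ≤ j ∧ pat <+: l.drop j) ↔ (m + 1 ≤ j ∧ pat <+: l.drop j) := by
        constructor <;> rintro ⟨_, h2⟩ <;> exact ⟨by omega, h2⟩
      rw [if_congr e1 rfl rfl, if_neg (by omega : ¬ j = m), add_zero]
  rw [Finset.sum_congr rfl h, Finset.sum_add_distrib, Finset.sum_ite_eq' (Finset.range l.length) m (fun _ => 1)]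
  rw [if_pos (Finset.mem_range.mpr hm)]

-- the while loop of _count_overlap computes pvOcc
lemma countOverlapGo_eq (l pat : List Char) (hpat : pat ≠ []) :
    ∀ (fuel k : Nat) (n : Int), k ≤ l.length → pvOcc l pat k < fuel →
    countOverlapGo l pat fuel (PySem.Chars.findFrom l pat (k : Int) none) n
      = n + (pvOcc l pat k : Int) := by
  intro fuel
  induction fuel with
  | zero => intro k n _ h; omega
  | succ fuel ih =>
    intro k n hk hfuel
    by_cases hneg : PySem.Chars.findFrom l pat (k : Int) none = -1
    · rw [hneg]
      simp only [countOverlapGo, if_true]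
      rw [pvOcc_eq_zero l pat k ((PySem.Chars.findFrom_natCast_eq_neg_one_iff l pat k hk).mp hneg)]
      simp
    · obtain ⟨hki, hpre, hmin⟩ := PySem.Chars.findFrom_natCast_spec l pat k hk hneg
      set i := PySem.Chars.findFrom l pat (k : Int) none with hi
      have hinn : (0 : Int) ≤ i := le_trans (by positivity) hki
      have hm : i.toNat < l.length := by
        have hne : l.drop i.toNat ≠ [] := by
          intro hnil; rw [hnil] at hpre; exact hpat (List.prefix_nil.mp hpre)
        rw [ne_eq, List.drop_eq_nil_iff] at hne; omega
      have hkm : k ≤ i.toNat := by omega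
      have hsplit := pvOcc_split l pat k i.toNat hm hkm hpre hmin
      simp only [countOverlapGo, if_neg hneg]
      have hcast : i + 1 = ((i.toNat + 1 : Nat) : Int) := by omega
      rw [hcast, ih (i.toNat + 1) (n + 1) (by omega) (by omega), hsplit]
      push_cast
      ring

-- countOverlap counts all occurrences (pvOcc from 0)
lemma countOverlap_eq (l pat : List Char) (hpat : pat ≠ []) :
    countOverlap l pat = (pvOcc l pat 0 : Int) := by
  unfold countOverlap
  rw [← PySem.Chars.findFrom_zero l pat]
  have h := countOverlapGo_eq l pat hpat (l.length + 1) 0 0 (by omega)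
    (by have := pvOcc_le_length l pat 0; omega)
  simpa using h

-- the pairwise count of A's loop equals the occurrence count of B's search
lemma zip_count_eq_pvOcc (a b : Char) : ∀ (l : List Char),
    (l.zip l.tail).count (a, b) = pvOcc l [a, b] 0 := by
  intro l
  induction l with
  | nil => simp [pvOcc]
  | cons c t ih =>
    unfold pvOcc
    simp only [List.length_cons]
    rw [Finset.sum_range_succ' (fun j => if 0 ≤ j ∧ [a, b] <+: (c :: t).drop j then 1 else 0)]
    have hsum : ∑ j ∈ Finset.range t.length,
        (if 0 ≤ j + 1 ∧ [a, b] <+: (c :: t).drop (j + 1) then 1 else 0)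
        = pvOcc t [a, b] 0 := by
      apply Finset.sum_congr rfl
      intro j _
      simp [List.drop_succ_cons]
    rw [hsum, ← ih]
    cases t with
    | nil => simp [List.cons_prefix_cons]
    | cons d t' =>
      simp only [List.tail_cons, List.zip_cons_cons, List.count_cons]
      have hiff : (0 ≤ 0 ∧ [a, b] <+: (c :: d :: t').drop 0) ↔ (((c, d) == (a, b)) = true) := by
        simp only [List.drop_zero, List.cons_prefix_cons, List.nil_prefix, and_true,
          beq_iff_eq, Prod.mk.injEq, le_refl, true_and]
        constructor <;> rintro ⟨h1, h2⟩ <;> exact ⟨h1.symm, h2.symm⟩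
      simp only [hiff]

-- A's loop, started at index a with x = a+1, adds to each counter the number of
-- occurrences of its pattern among the adjacent pairs of l.drop a.
lemma SerieTest_loop (l : List Char) : ∀ (n a : Nat), l.length ≤ a + n →
    ∀ (p nx : Char) (f1 f2 f3 f4 : Int), ∃ x' p' nx',
    (PySem.List.pyRange a ((l.length : Int) - 1) 1).foldl (SerieTestStep l)
      ((a : Int) + 1, p, nx, f1, f2, f3, f4)
    = (x', p', nx',
       f1 + (((l.drop a).zip (l.drop (a + 1))).count ('0', '0') : Int),
       f2 + (((l.drop a).zip (l.drop (a + 1))).count ('0', '1') : Int),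
       f3 + (((l.drop a).zip (l.drop (a + 1))).count ('1', '0') : Int),
       f4 + (((l.drop a).zip (l.drop (a + 1))).count ('1', '1') : Int)) := by
  intro n
  induction n with
  | zero =>
    intro a ha p nx f1 f2 f3 f4
    rw [PySem.List.pyRange_one_eq_nil (by omega), List.drop_eq_nil_of_le (by omega)]
    exact ⟨(a : Int) + 1, p, nx, by simp⟩
  | succ n ih =>
    intro a ha p nx f1 f2 f3 f4
    by_cases h : a + 1 < l.length
    · rw [PySem.List.pyRange_one_cons (by omega)]
      simp only [List.foldl_cons]
      have h1 : SerieTestStep l ((a : Int) + 1, p, nx, f1, f2, f3, f4) a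
          = ((a : Int) + 1 + 1, l[a], l[a + 1],
             (if l[a] = '0' ∧ l[a + 1] = '0' then f1 + 1 else f1),
             (if l[a] = '0' ∧ l[a + 1] = '1' then f2 + 1 else f2),
             (if l[a] = '1' ∧ l[a + 1] = '0' then f3 + 1 else f3),
             (if l[a] = '1' ∧ l[a + 1] = '1' then f4 + 1 else f4)) := by
        have ha1 : ((a : Int) + 1) = ((a + 1 : Nat) : Int) := by push_cast; ring
        simp only [SerieTestStep, ha1, PySem.List.pyGetD_natCast]
        rw [List.getD_eq_getElem l ' ' (by omega), List.getD_eq_getElem l ' ' (by omega)]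
      rw [h1]
      have hcast : ((a : Int) + 1 + 1) = ((a + 1 : Nat) : Int) + 1 := by push_cast; ring
      have hcast2 : ((a : Int) + 1) = ((a + 1 : Nat) : Int) := by push_cast; ring
      rw [hcast, hcast2]
      obtain ⟨x', p', nx', hrec⟩ := ih (a + 1) (by omega) l[a] l[a + 1]
        (if l[a] = '0' ∧ l[a + 1] = '0' then f1 + 1 else f1)
        (if l[a] = '0' ∧ l[a + 1] = '1' then f2 + 1 else f2)
        (if l[a] = '1' ∧ l[a + 1] = '0' then f3 + 1 else f3)
        (if l[a] = '1' ∧ l[a + 1] = '1' then f4 + 1 else f4)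
      refine ⟨x', p', nx', ?_⟩
      rw [hrec]
      have hdz : (l.drop a).zip (l.drop (a + 1))
          = (l[a], l[a + 1]) :: ((l.drop (a + 1)).zip (l.drop (a + 1 + 1))) := by
        rw [List.drop_eq_getElem_cons (by omega : a < l.length),
            List.drop_eq_getElem_cons (by omega : a + 1 < l.length)]
        rfl
      rw [hdz]
      simp only [Prod.mk.injEq]
      refine ⟨trivial, trivial, trivial, ?_, ?_, ?_, ?_⟩ <;>
      · rw [List.count_cons]
        simp only [beq_iff_eq, Prod.mk.injEq]
        split_ifs with hc <;> omega
    · rw [PySem.List.pyRange_one_eq_nil (by omega),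
          List.drop_eq_nil_of_le (by omega : l.length ≤ a + 1)]
      exact ⟨(a : Int) + 1, p, nx, by simp⟩

-- ===== VERDICT (by name: the statement is the Claim_ definition above) =====
theorem SerieTest_spec : Claim_equal_SerieTest := by
  intro bitArray _
  unfold Spec_SerieTest SerieTest SerieTest_alt
  dsimp only
  set l := bitArray.toList with hl
  obtain ⟨x', p', nx', hloop⟩ := SerieTest_loop l l.length 0 (by omega) ' ' ' ' 0 0 0 0
  simp only [Nat.cast_zero, zero_add] at hloop
  rw [hloop]
  rw [List.drop_zero, List.drop_one]
  simp only [Prod.mk.injEq]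
  refine ⟨trivial, ?_, ?_, ?_, ?_⟩ <;>
    rw [countOverlap_eq l _ (by simp), ← zip_count_eq_pvOcc]
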